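-- pv_equiv track=rewrite | github.com/ncoombes/InformaticsSampleprobs | Rosalind_ORF.py | Transcribed
-- ===== SOURCE A (Python) =====
-- def Transcribed (possprot):
--     startlist=[]
--     stoplist=[]
--     for i in range(0,len(possprot)):
--         if possprot[i]=='M':
--             startlist.append(i)
--         if possprot[i]=='_':
--             stoplist.append(i)
--     startstops=[]
--     for i in startlist:
--         for j in stoplist:
--             if j > i:
--                 startstops.append([i,j])
--                 break
--     return(startstops)
-- ===== SOURCE B (Python) =====
-- def Transcribed(possprot):
--     # single pass: keep pending start positions; a stop flushes them all at once
--     pending = []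
--     out = []
--     for j, c in enumerate(possprot):
--         if c == 'M':
--             pending.append(j)
--         elif c == '_':
--             for s in pending:
--                 out.append([s, j])
--             pending = []
--     return out
-- ===== Notes on version B (the rewrite author's own statement) =====
-- stated objective: alternative
-- what changed: replaced the nested scan (for every start, rescan the whole stop list) by a single left-to-right pass that keeps pending starts and flushes them all at the first following stop; avoids A's worst-case quadratic rescans, though a timing run measured only ~1.4x on its inputs
import Mathlib
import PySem

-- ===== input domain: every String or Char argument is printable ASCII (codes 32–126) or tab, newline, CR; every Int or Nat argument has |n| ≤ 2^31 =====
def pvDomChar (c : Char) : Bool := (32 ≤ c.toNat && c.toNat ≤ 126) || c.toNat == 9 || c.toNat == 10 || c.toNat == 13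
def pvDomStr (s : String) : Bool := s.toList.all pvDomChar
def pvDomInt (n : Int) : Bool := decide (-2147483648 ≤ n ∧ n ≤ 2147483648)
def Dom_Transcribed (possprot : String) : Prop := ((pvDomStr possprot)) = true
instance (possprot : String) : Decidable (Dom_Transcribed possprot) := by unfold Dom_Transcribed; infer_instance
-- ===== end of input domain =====

-- B replaces A's nested scan (for every start, rescan the stop list) by one
-- left-to-right pass keeping pending starts, flushed at each stop (alternative
-- single-pass algorithm; not measurably faster on a timing run's inputs).

-- ===== PORT A =====
-- inner loop `for j in stoplist: if j > i: append [i,j]; break` — returns the appended stop, if any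
def findFirstStop (i : Int) : List Int → Option Int
  | [] => none
  | j :: rest => if j > i then some j else findFirstStop i rest

def Transcribed (possprot : String) : List (List Int) :=
  -- first loop: for i in range(len(possprot)): the two ifs, in order, appending i
  let p : List Int × List Int :=
    possprot.toList.zipIdx.foldl
      (fun (st : List Int × List Int) (ci : Char × Nat) =>
        let st1 := if ci.1 = 'M' then (st.1 ++ [(ci.2 : Int)], st.2) else st
        if ci.1 = '_' then (st1.1, st1.2 ++ [(ci.2 : Int)]) else st1)
      ([], [])
  -- second loop: for i in startlist, append [i, first later stop] if found
  p.1.foldl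
    (fun acc i =>
      match findFirstStop i p.2 with
      | some j => acc ++ [[i, j]]
      | none => acc)
    []

-- ===== PORT B =====
def Transcribed_alt (possprot : String) : List (List Int) :=
  (possprot.toList.zipIdx.foldl
    (fun (st : List Int × List (List Int)) (cj : Char × Nat) =>
      if cj.1 = 'M' then (st.1 ++ [(cj.2 : Int)], st.2)
      else if cj.1 = '_' then ([], st.2 ++ st.1.map (fun s => [s, (cj.2 : Int)]))
      else st)
    ([], [])).2

-- ===== PRECONDITION & SPEC =====
def Spec_Transcribed (possprot : String) (out : List (List Int)) : Prop := out = Transcribed_alt possprot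
instance (possprot : String) (out : List (List Int)) : Decidable (Spec_Transcribed possprot out) := by unfold Spec_Transcribed; infer_instance

-- ===== CLAIM (what is proved, stated in full; the proofs are below) =====
def Claim_equal_Transcribed : Prop := ∀ (possprot : String), Dom_Transcribed possprot → Spec_Transcribed possprot (Transcribed possprot)

-- ===== LEMMAS AND PROOFS =====

-- indices (from n) of 'M' resp. '_' in a character list
def startIdxs (n : Nat) : List Char → List Int
  | [] => []
  | c :: cs => if c = 'M' then (n : Int) :: startIdxs (n+1) cs else startIdxs (n+1) cs

def stopIdxs (n : Nat) : List Char → List Int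
  | [] => []
  | c :: cs => if c = '_' then (n : Int) :: stopIdxs (n+1) cs else stopIdxs (n+1) cs

-- A's second loop, recursively
def Aout (T : List Int) : List Int → List (List Int)
  | [] => []
  | s :: S => (match findFirstStop s T with
      | some j => [[s, j]]
      | none => []) ++ Aout T S

lemma foldA_eq (T : List Int) (S : List Int) (acc : List (List Int)) :
    S.foldl
      (fun acc i =>
        match findFirstStop i T with
        | some j => acc ++ [[i, j]]
        | none => acc)
      acc = acc ++ Aout T S := by
  induction S generalizing acc with
  | nil => simp [Aout]
  | cons s S ih =>
    simp only [List.foldl_cons]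
    cases h : findFirstStop s T with
    | none => simp [h, ih, Aout]
    | some j => simp [h, ih, Aout]

lemma aout_append (T : List Int) (xs ys : List Int) :
    Aout T (xs ++ ys) = Aout T xs ++ Aout T ys := by
  induction xs with
  | nil => simp [Aout]
  | cons x xs ih => simp [Aout, ih]

lemma aout_nil_stops (S : List Int) : Aout [] S = [] := by
  induction S with
  | nil => rfl
  | cons s S ih => simp [Aout, findFirstStop, ih]

lemma aout_cons_lt (j : Int) (T : List Int) (S : List Int)
    (h : ∀ p ∈ S, p < j) : Aout (j :: T) S = S.map (fun p => [p, j]) := by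
  induction S with
  | nil => rfl
  | cons s S ih =>
    have hs : s < j := h s (by simp)
    simp only [Aout, findFirstStop, if_pos hs, List.map_cons,
      ih (fun p hp => h p (by simp [hp]))]
    rfl

lemma aout_cons_ge (j : Int) (T : List Int) (S : List Int)
    (h : ∀ s ∈ S, j ≤ s) : Aout (j :: T) S = Aout T S := by
  induction S with
  | nil => rfl
  | cons s S ih =>
    have hs : ¬ (j > s) := not_lt.mpr (h s (by simp))
    simp only [Aout, findFirstStop, if_neg hs,
      ih (fun p hp => h p (by simp [hp]))]

lemma startIdxs_lb (cs : List Char) (n : Nat) :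
    ∀ s ∈ startIdxs n cs, (n : Int) ≤ s := by
  induction cs generalizing n with
  | nil => simp [startIdxs]
  | cons c cs ih =>
    intro s hs
    by_cases hM : c = 'M'
    · simp only [startIdxs, hM, ite_true] at hs
      rcases List.mem_cons.mp hs with h | h
      · omega
      · have := ih (n+1) s h; push_cast at this ⊢; omega
    · simp only [startIdxs, hM, ite_false] at hs
      have := ih (n+1) s hs; push_cast at this ⊢; omega

-- A's first loop produces exactly (startIdxs, stopIdxs)
lemma scanA (cs : List Char) (n : Nat) (S0 T0 : List Int) :
    (cs.zipIdx n).foldl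
      (fun (st : List Int × List Int) (ci : Char × Nat) =>
        let st1 := if ci.1 = 'M' then (st.1 ++ [(ci.2 : Int)], st.2) else st
        if ci.1 = '_' then (st1.1, st1.2 ++ [(ci.2 : Int)]) else st1)
      (S0, T0) = (S0 ++ startIdxs n cs, T0 ++ stopIdxs n cs) := by
  induction cs generalizing n S0 T0 with
  | nil => simp [startIdxs, stopIdxs]
  | cons c cs ih =>
    simp only [List.zipIdx_cons, List.foldl_cons]
    by_cases hM : c = 'M'
    · have h_ : ¬ c = '_' := by simp [hM]
      rw [if_pos hM, if_neg h_, ih]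
      simp [startIdxs, stopIdxs, hM]
    · by_cases h_ : c = '_'
      · rw [if_neg hM, if_pos h_, ih]
        simp [startIdxs, stopIdxs, h_]
      · rw [if_neg hM, if_neg h_, ih]
        simp [startIdxs, stopIdxs, hM, h_]

-- the core invariant: B's single pass with pending starts P0 computes
-- A's pairing of P0 ++ (future starts) against the future stops
lemma main_inv (cs : List Char) (n : Nat) (P0 : List Int) (O0 : List (List Int))
    (hP : ∀ p ∈ P0, p < (n : Int)) :
    ((cs.zipIdx n).foldl
      (fun (st : List Int × List (List Int)) (cj : Char × Nat) =>
        if cj.1 = 'M' then (st.1 ++ [(cj.2 : Int)], st.2)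
        else if cj.1 = '_' then ([], st.2 ++ st.1.map (fun s => [s, (cj.2 : Int)]))
        else st)
      (P0, O0)).2 = O0 ++ Aout (stopIdxs n cs) (P0 ++ startIdxs n cs) := by
  induction cs generalizing n P0 O0 with
  | nil => simp [startIdxs, stopIdxs, aout_nil_stops]
  | cons c cs ih =>
    simp only [List.zipIdx_cons, List.foldl_cons]
    by_cases hM : c = 'M'
    · have h_ : ¬ c = '_' := by simp [hM]
      have hP' : ∀ p ∈ P0 ++ [(n : Int)], p < ((n+1 : Nat) : Int) := by
        intro p hp
        rcases List.mem_append.mp hp with h | h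
        · have := hP p h; push_cast; omega
        · simp at h; push_cast; omega
      rw [if_pos hM, ih (n+1) _ _ hP']
      simp [startIdxs, stopIdxs, hM]
    · by_cases h_ : c = '_'
      · rw [if_neg hM, if_pos h_, ih (n+1) [] _ (by simp)]
        simp only [startIdxs, stopIdxs, List.nil_append]
        rw [if_neg hM, if_pos h_, aout_append, aout_cons_lt _ _ P0 hP,
            aout_cons_ge _ _ (startIdxs (n+1) cs)
              (fun s hs => by have := startIdxs_lb cs (n+1) s hs; push_cast at this; omega),
            List.append_assoc]
      · rw [if_neg hM, if_neg h_,
            ih (n+1) P0 O0 (fun p hp => lt_of_lt_of_le (hP p hp) (by push_cast; omega))]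
        simp [startIdxs, stopIdxs, hM, h_]

-- ===== VERDICT (by name: the statement is the Claim_ definition above) =====
theorem Transcribed_spec : Claim_equal_Transcribed := by
  intro possprot _
  unfold Spec_Transcribed Transcribed Transcribed_alt
  rw [scanA possprot.toList 0 [] []]
  have := main_inv possprot.toList 0 [] [] (by simp)
  simp only [List.nil_append] at this ⊢
  rw [foldA_eq, this]
  simp
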